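-- pv_equiv track=rewrite | github.com/getnikola/nikola | nikola/hierarchy_utils.py | parse_escaped_hierarchical_category_name
-- ===== SOURCE A (Python) =====
-- def parse_escaped_hierarchical_category_name(category_name):
--     """Parse a category name."""
--     result = []
--     current = None
--     index = 0
--     next_backslash = category_name.find('\\', index)
--     next_slash = category_name.find('/', index)
--     while index < len(category_name):
--         if next_backslash == -1 and next_slash == -1:
--             current = (current if current else "") + category_name[index:]
--             index = len(category_name)
--         elif next_slash >= 0 and (next_backslash == -1 or next_backslash > next_slash):
--             result.append((current if current else "") + category_name[index:next_slash])
--             current = ''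
--             index = next_slash + 1
--             next_slash = category_name.find('/', index)
--         else:
--             if len(category_name) == next_backslash + 1:
--                 raise Exception("Unexpected '\\' in '{0}' at last position!".format(category_name))
--             esc_ch = category_name[next_backslash + 1]
--             if esc_ch not in {'/', '\\'}:
--                 raise Exception("Unknown escape sequence '\\{0}' in '{1}'!".format(esc_ch, category_name))
--             current = (current if current else "") + category_name[index:next_backslash] + esc_ch
--             index = next_backslash + 2
--             next_backslash = category_name.find('\\', index)
--             if esc_ch == '/':
--                 next_slash = category_name.find('/', index)
--     if current is not None:
--         result.append(current)
--     return result
-- ===== SOURCE B (Python) =====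
-- def parse_escaped_hierarchical_category_name(category_name):
--     """Parse a category name."""
--     result = []
--     current = None
--     it = iter(category_name)
--     for ch in it:
--         if ch == '\\':
--             esc = next(it, None)
--             if esc is None:
--                 raise Exception("Unexpected '\\' in '{0}' at last position!".format(category_name))
--             if esc != '/' and esc != '\\':
--                 raise Exception("Unknown escape sequence '\\{0}' in '{1}'!".format(esc, category_name))
--             current = (current or '') + esc
--         elif ch == '/':
--             result.append(current or '')
--             current = ''
--         else:
--             current = (current or '') + ch
--     if current is not None:
--         result.append(current)
--     return result
-- ===== Notes on version B (the rewrite author's own statement) =====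
-- stated objective: simpler
-- what changed: Replaced A's find()-lookahead machinery (index/next_backslash/next_slash state with slice copies and conditional re-scans) by a plain single-pass character scanner over an iterator with no index arithmetic.
import Mathlib
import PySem

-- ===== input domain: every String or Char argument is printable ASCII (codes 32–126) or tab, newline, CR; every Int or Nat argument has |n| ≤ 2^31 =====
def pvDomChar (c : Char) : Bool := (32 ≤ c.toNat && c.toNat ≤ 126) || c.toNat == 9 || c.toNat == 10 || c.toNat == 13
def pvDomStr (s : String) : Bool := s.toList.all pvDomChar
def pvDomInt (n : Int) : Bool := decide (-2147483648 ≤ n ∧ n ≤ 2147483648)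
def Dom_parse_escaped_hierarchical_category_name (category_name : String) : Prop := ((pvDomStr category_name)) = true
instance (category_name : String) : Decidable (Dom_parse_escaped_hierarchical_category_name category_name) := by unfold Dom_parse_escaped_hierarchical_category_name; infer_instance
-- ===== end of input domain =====

-- B replaces A's find-lookahead slice machinery by a plain single-character scanner (simpler); equivalence is about the return value, both raise on the same inputs (excluded by Pre_).

-- ===== PORT A =====
-- A's while-loop: state (result, current, index, next_backslash, next_slash); fuel only makes the
-- recursion total (index strictly increases each iteration, so cs.length + 2 suffices); `none`
-- encodes the two `raise` paths (and exhausted fuel, which Pre_ rules out).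
def pvLoopA (cs : List Char) (fuel : Nat) (result : List (List Char))
    (current : Option (List Char)) (index nb ns : Int) :
    Option (List (List Char) × Option (List Char)) :=
  match fuel with
  | 0 => none
  | fuel + 1 =>
    if index < (cs.length : Int) then
      if nb = -1 ∧ ns = -1 then
        pvLoopA cs fuel result (some (current.getD [] ++ PySem.List.slice cs (some index) none))
          (cs.length : Int) nb ns
      else if 0 ≤ ns ∧ (nb = -1 ∨ nb > ns) then
        pvLoopA cs fuel (result ++ [current.getD [] ++ PySem.List.slice cs (some index) (some ns)])
          (some []) (ns + 1) nb (PySem.Chars.findFrom cs ['/'] (ns + 1))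
      else
        if (cs.length : Int) = nb + 1 then none   -- raise: '\' at last position
        else
          match PySem.List.pyGet? cs (nb + 1) with
          | none => none
          | some esc =>
            if esc = '/' ∨ esc = '\\' then
              pvLoopA cs fuel result
                (some (current.getD [] ++ PySem.List.slice cs (some index) (some nb) ++ [esc]))
                (nb + 2) (PySem.Chars.findFrom cs ['\\'] (nb + 2))
                (if esc = '/' then PySem.Chars.findFrom cs ['/'] (nb + 2) else ns)
            else none                              -- raise: unknown escape sequence
    else some (result, current)

def parse_escaped_hierarchical_category_name (category_name : String) : List String :=
  match pvLoopA category_name.toList (category_name.toList.length + 2) [] none 0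
      (PySem.Chars.findFrom category_name.toList ['\\'] 0)
      (PySem.Chars.findFrom category_name.toList ['/'] 0) with
  | none => []
  | some (result, current) =>
    (match current with
     | none => result
     | some c => result ++ [c]).map String.ofList

-- ===== PORT B =====
-- B's for-loop over the characters: `none` encodes the two raise paths.
def pvScanB (cs : List Char) (result : List (List Char)) (current : Option (List Char)) :
    Option (List (List Char) × Option (List Char)) :=
  match cs with
  | [] => some (result, current)
  | ch :: rest =>
    if ch = '\\' then
      match rest with
      | [] => none                                 -- raise: '\' at last position
      | esc :: rest' =>
        if esc = '/' ∨ esc = '\\' then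
          pvScanB rest' result (some (current.getD [] ++ [esc]))
        else none                                  -- raise: unknown escape sequence
    else if ch = '/' then
      pvScanB rest (result ++ [current.getD []]) (some [])
    else
      pvScanB rest result (some (current.getD [] ++ [ch]))
termination_by cs.length
decreasing_by all_goals simp

def parse_escaped_hierarchical_category_name_alt (category_name : String) : List String :=
  match pvScanB category_name.toList [] none with
  | none => []
  | some (result, current) =>
    (match current with
     | none => result
     | some c => result ++ [c]).map String.ofList

-- ===== PRECONDITION & SPEC =====
-- Pre_ excludes exactly the inputs where A raises: a '\' at the last position or a '\' followed
-- by anything other than '/' or '\'.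
def pvOkEsc : List Char → Bool
  | [] => true
  | c :: rest =>
    if c = '\\' then
      match rest with
      | [] => false
      | e :: rest' => (e = '/' || e = '\\') && pvOkEsc rest'
    else pvOkEsc rest

def Pre_parse_escaped_hierarchical_category_name (category_name : String) : Prop :=
  pvOkEsc category_name.toList = true
instance (category_name : String) : Decidable (Pre_parse_escaped_hierarchical_category_name category_name) := by
  unfold Pre_parse_escaped_hierarchical_category_name; infer_instance

def pvWitness_parse_escaped_hierarchical_category_name : String := "a\\/b/c"

def Spec_parse_escaped_hierarchical_category_name (category_name : String) (out : List String) : Prop := out = parse_escaped_hierarchical_category_name_alt category_name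
instance (category_name : String) (out : List String) : Decidable (Spec_parse_escaped_hierarchical_category_name category_name out) := by unfold Spec_parse_escaped_hierarchical_category_name; infer_instance

-- ===== CLAIM (what is proved, stated in full; the proofs are below) =====
def Claim_equal_parse_escaped_hierarchical_category_name : Prop := ∀ (category_name : String), Dom_parse_escaped_hierarchical_category_name category_name → Pre_parse_escaped_hierarchical_category_name category_name → Spec_parse_escaped_hierarchical_category_name category_name (parse_escaped_hierarchical_category_name category_name)

-- ===== LEMMAS AND PROOFS =====

theorem pvScanB_cons (ch : Char) (rest : List Char) (res : List (List Char)) (cur : Option (List Char)) :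
    pvScanB (ch :: rest) res cur =
      if ch = '\\' then
        (match rest with
         | [] => none
         | esc :: rest' =>
           if esc = '/' ∨ esc = '\\' then pvScanB rest' res (some (cur.getD [] ++ [esc])) else none)
      else if ch = '/' then pvScanB rest (res ++ [cur.getD []]) (some [])
      else pvScanB rest res (some (cur.getD [] ++ [ch])) := by
  rw [pvScanB.eq_def]

theorem pvScanB_nil (res : List (List Char)) (cur : Option (List Char)) :
    pvScanB [] res cur = some (res, cur) := by
  rw [pvScanB.eq_def]

theorem pvOkEsc_cons (c : Char) (rest : List Char) :
    pvOkEsc (c :: rest) =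
      if c = '\\' then
        (match rest with
         | [] => false
         | e :: rest' => (e = '/' || e = '\\') && pvOkEsc rest')
      else pvOkEsc rest := by
  rw [pvOkEsc.eq_def]

-- a singleton is a prefix iff it is the head
theorem pv_singleton_prefix (c : Char) (m : List Char) : [c] <+: m ↔ m.head? = some c := by
  cases m with
  | nil => simp
  | cons a l => simp [List.cons_prefix_cons, eq_comm]

-- a singleton is infix iff the char is a member
theorem pv_singleton_infix (c : Char) (m : List Char) : [c] <:+: m ↔ c ∈ m := by
  constructor
  · intro h; exact h.subset (by simp)
  · intro h
    obtain ⟨s, t, rfl⟩ := List.append_of_mem h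
    exact ⟨s, t, by simp⟩

-- the invariant A's loop maintains for next_backslash / next_slash, phrased on the suffix t = cs.drop k
def pvInvAt (t : List Char) (k : Nat) (c : Char) (v : Int) : Prop :=
  (v = -1 ∧ c ∉ t) ∨
  (∃ j : Nat, v = (k : Int) + j ∧ t[j]? = some c ∧ ∀ i < j, t[i]? ≠ some c)

-- findFrom establishes the invariant
theorem pv_findChar (cs : List Char) (c : Char) (k : Nat) (hk : k ≤ cs.length) :
    pvInvAt (cs.drop k) k c (PySem.Chars.findFrom cs [c] (k : Int)) := by
  by_cases h : PySem.Chars.findFrom cs [c] (k : Int) = -1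
  · left
    refine ⟨h, ?_⟩
    have := (PySem.Chars.findFrom_natCast_eq_neg_one_iff cs [c] k hk).mp h
    rw [pv_singleton_infix] at this
    exact this
  · right
    obtain ⟨hle, hpre, hmin⟩ := PySem.Chars.findFrom_natCast_spec cs [c] k hk h
    set v := PySem.Chars.findFrom cs [c] (k : Int) with hv
    have hv0 : 0 ≤ v := le_trans (by positivity) hle
    refine ⟨v.toNat - k, ?_, ?_, ?_⟩
    · have : k ≤ v.toNat := by omega
      omega
    · rw [pv_singleton_prefix] at hpre
      rw [List.getElem?_drop]
      have : k + (v.toNat - k) = v.toNat := by omega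
      rw [this, ← List.head?_drop]
      exact hpre
    · intro i hi
      rw [List.getElem?_drop, ← List.head?_drop]
      intro hc
      exact hmin (k + i) (by omega) (by omega) ((pv_singleton_prefix c _).mpr hc)

-- pvScanB over a run of plain characters (no '\' and no '/'), starting from a some-current
theorem pv_scan_plain_some (u : List Char) (hu : ∀ a ∈ u, a ≠ '\\' ∧ a ≠ '/') :
    ∀ v res c, pvScanB (u ++ v) res (some c) = pvScanB v res (some (c ++ u)) := by
  induction u with
  | nil => intro v res c; simp
  | cons a u ih =>
    intro v res c
    obtain ⟨ha1, ha2⟩ := hu a (by simp)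
    rw [List.cons_append, pvScanB_cons, if_neg ha1, if_neg ha2]
    simp only [Option.getD_some]
    rw [ih (fun x hx => hu x (by simp [hx])) v res (c ++ [a])]
    simp

def pvPush (cur : Option (List Char)) (u : List Char) : Option (List Char) :=
  if u = [] then cur else some (cur.getD [] ++ u)

theorem pv_scan_plain (u : List Char) (hu : ∀ a ∈ u, a ≠ '\\' ∧ a ≠ '/')
    (v : List Char) (res : List (List Char)) (cur : Option (List Char)) :
    pvScanB (u ++ v) res cur = pvScanB v res (pvPush cur u) := by
  cases u with
  | nil => simp [pvPush]
  | cons a u =>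
    obtain ⟨ha1, ha2⟩ := hu a (by simp)
    rw [List.cons_append, pvScanB_cons, if_neg ha1, if_neg ha2,
      pv_scan_plain_some u (fun x hx => hu x (by simp [hx]))]
    simp [pvPush]

theorem pv_push_getD (cur : Option (List Char)) (u : List Char) :
    (pvPush cur u).getD [] = cur.getD [] ++ u := by
  unfold pvPush; split_ifs with h <;> simp [h]

-- pvOkEsc ignores a prefix without backslashes
theorem pv_ok_plain (u : List Char) (hu : '\\' ∉ u) (w : List Char) :
    pvOkEsc (u ++ w) = pvOkEsc w := by
  induction u with
  | nil => rfl
  | cons a u ih =>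
    simp at hu
    rw [List.cons_append, pvOkEsc_cons, if_neg (fun h => hu.1 h.symm)]
    exact ih hu.2

-- helper: members of a plain segment (before the first occurrence) are not that char
theorem pv_take_not_mem (t : List Char) (c : Char) (j : Nat)
    (hmin : ∀ i < j, t[i]? ≠ some c) : c ∉ t.take j := by
  intro hmem
  obtain ⟨i, hi, hget⟩ := List.getElem_of_mem hmem
  have hlt : i < j := by rw [List.length_take] at hi; omega
  exact hmin i hlt (by
    have h2 : (t.take j)[i]? = t[i]? := List.getElem?_take_of_lt hlt
    rw [← h2]; simp [List.getElem?_eq_getElem hi, hget])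

-- shifting an invariant past a segment free of the character
theorem pv_inv_shift (t : List Char) (k d : Nat) (c : Char) (v : Int)
    (h : pvInvAt t k c v) (hd : ∀ i < d, t[i]? ≠ some c) :
    pvInvAt (t.drop d) (k + d) c v := by
  cases h with
  | inl h => exact Or.inl ⟨h.1, fun hm => h.2 (List.mem_of_mem_drop hm)⟩
  | inr h =>
    obtain ⟨j, hv, hg, hm⟩ := h
    have hjd : d ≤ j := by
      by_contra hc
      exact hd j (by omega) hg
    refine Or.inr ⟨j - d, by rw [hv]; push_cast; omega, ?_, ?_⟩
    · rw [List.getElem?_drop, show d + (j - d) = j by omega]; exact hg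
    · intro i hi
      rw [List.getElem?_drop]
      exact hm (d + i) (by omega)

-- one loop iteration of A that consumes up to the next unescaped slash
theorem pv_step_slash (fuel : Nat)
    (ih : ∀ (t cs : List Char) (k : Nat) res cur nb ns,
      cs.drop k = t → k ≤ cs.length → t.length + 2 ≤ fuel → pvOkEsc t = true →
      pvInvAt t k '\\' nb → pvInvAt t k '/' ns →
      pvLoopA cs fuel res cur (k : Int) nb ns = pvScanB t res cur)
    (t cs : List Char) (k : Nat) (res : List (List Char)) (cur : Option (List Char)) (nb ns : Int)
    (ht : cs.drop k = t) (hk : k ≤ cs.length) (hlt : k < cs.length)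
    (hf : t.length + 2 ≤ fuel + 1) (hok : pvOkEsc t = true)
    (j : Nat) (hnsv : ns = (k : Int) + j) (hgj : t[j]? = some '/')
    (hmj : ∀ i < j, t[i]? ≠ some '/')
    (hnb : pvInvAt t k '\\' nb) (hbgt : nb = -1 ∨ (k : Int) + j < nb) :
    pvLoopA cs (fuel + 1) res cur (k : Int) nb ns = pvScanB t res cur := by
  have hlen : t.length = cs.length - k := by rw [← ht]; simp
  obtain ⟨hjlen, hgj'⟩ := List.getElem?_eq_some_iff.mp hgj
  have hd_b : ∀ i < j, t[i]? ≠ some '\\' := by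
    intro i hi hc
    cases hnb with
    | inl h =>
      obtain ⟨h1, h2⟩ := List.getElem?_eq_some_iff.mp hc
      exact h.2 (h2 ▸ List.getElem_mem h1)
    | inr h =>
      obtain ⟨j', hv, hg, hm⟩ := h
      have : (j : Int) < j' := by
        cases hbgt with
        | inl h0 => rw [h0] at hv; omega
        | inr h0 => rw [hv] at h0; omega
      exact hm i (by omega) hc
  have hplain : ∀ a ∈ t.take j, a ≠ '\\' ∧ a ≠ '/' := fun a ha =>
    ⟨fun hc => pv_take_not_mem t '\\' j hd_b (hc ▸ ha),
     fun hc => pv_take_not_mem t '/' j hmj (hc ▸ ha)⟩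
  have hdec : t = t.take j ++ '/' :: t.drop (j + 1) := by
    conv_lhs => rw [← List.take_append_drop j t]
    rw [List.drop_eq_getElem_cons hjlen, hgj']
  rw [pvLoopA, if_pos (show (k : Int) < (cs.length : Int) by exact_mod_cast hlt)]
  rw [if_neg (show ¬(nb = -1 ∧ ns = -1) by intro h; rw [hnsv] at h; omega)]
  rw [if_pos (show 0 ≤ ns ∧ (nb = -1 ∨ nb > ns) by
    refine ⟨by rw [hnsv]; positivity, ?_⟩
    cases hbgt with
    | inl h => exact Or.inl h
    | inr h => exact Or.inr (by rw [hnsv]; exact h))]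
  have hsl : PySem.List.slice cs (some (k : Int)) (some ns) = t.take j := by
    rw [hnsv, show (k : Int) + j = ((k + j : Nat) : Int) by push_cast; ring,
      PySem.List.slice_natCast, ht, show k + j - k = j by omega]
  rw [hsl, show ns + 1 = ((k + (j + 1) : Nat) : Int) by rw [hnsv]; push_cast; ring]
  have hk' : k + (j + 1) ≤ cs.length := by omega
  have ht' : cs.drop (k + (j + 1)) = t.drop (j + 1) := by
    rw [← ht, List.drop_drop, Nat.add_comm]
  have hok' : pvOkEsc (t.drop (j + 1)) = true := by
    rw [hdec, pv_ok_plain _ (pv_take_not_mem t '\\' j hd_b), pvOkEsc_cons,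
      if_neg (by decide : ¬('/' = '\\'))] at hok
    exact hok
  have hinvb : pvInvAt (t.drop (j + 1)) (k + (j + 1)) '\\' nb := by
    refine pv_inv_shift t k (j + 1) '\\' nb hnb ?_
    intro i hi hc
    rcases Nat.lt_succ_iff_lt_or_eq.mp hi with h | h
    · exact hd_b i h hc
    · subst h; rw [hgj] at hc; simp at hc
  have hinvs : pvInvAt (t.drop (j + 1)) (k + (j + 1)) '/'
      (PySem.Chars.findFrom cs ['/'] ((k + (j + 1) : Nat) : Int)) := by
    have := pv_findChar cs '/' (k + (j + 1)) hk'
    rwa [ht'] at this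
  rw [ih (t.drop (j + 1)) cs (k + (j + 1)) _ _ _ _ ht' hk'
    (by rw [List.length_drop]; omega) hok' hinvb hinvs]
  conv_rhs => rw [hdec]
  rw [pv_scan_plain _ hplain, pvScanB_cons, if_neg (by decide : ¬('/' = '\\')),
    if_pos rfl, pv_push_getD]

-- one loop iteration of A that consumes up to (and including) the next escape pair
theorem pv_step_backslash (fuel : Nat)
    (ih : ∀ (t cs : List Char) (k : Nat) res cur nb ns,
      cs.drop k = t → k ≤ cs.length → t.length + 2 ≤ fuel → pvOkEsc t = true →
      pvInvAt t k '\\' nb → pvInvAt t k '/' ns →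
      pvLoopA cs fuel res cur (k : Int) nb ns = pvScanB t res cur)
    (t cs : List Char) (k : Nat) (res : List (List Char)) (cur : Option (List Char)) (nb ns : Int)
    (ht : cs.drop k = t) (hk : k ≤ cs.length) (hlt : k < cs.length)
    (hf : t.length + 2 ≤ fuel + 1) (hok : pvOkEsc t = true)
    (j : Nat) (hnbv : nb = (k : Int) + j) (hgj : t[j]? = some '\\')
    (hmj : ∀ i < j, t[i]? ≠ some '\\')
    (hnsc : (ns = -1 ∧ '/' ∉ t) ∨
      (∃ js : Nat, ns = (k : Int) + js ∧ t[js]? = some '/' ∧ (∀ i < js, t[i]? ≠ some '/') ∧ j < js)) :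
    pvLoopA cs (fuel + 1) res cur (k : Int) nb ns = pvScanB t res cur := by
  have hlen : t.length = cs.length - k := by rw [← ht]; simp
  obtain ⟨hjlen, hgj'⟩ := List.getElem?_eq_some_iff.mp hgj
  have hd_s : ∀ i < j, t[i]? ≠ some '/' := by
    intro i hi hc
    cases hnsc with
    | inl h =>
      obtain ⟨h1, h2⟩ := List.getElem?_eq_some_iff.mp hc
      exact h.2 (h2 ▸ List.getElem_mem h1)
    | inr h =>
      obtain ⟨js, _, _, hm, hjs⟩ := h
      exact hm i (by omega) hc
  have hplain : ∀ a ∈ t.take j, a ≠ '\\' ∧ a ≠ '/' := fun a ha =>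
    ⟨fun hc => pv_take_not_mem t '\\' j hmj (hc ▸ ha),
     fun hc => pv_take_not_mem t '/' j hd_s (hc ▸ ha)⟩
  have hdec : t = t.take j ++ '\\' :: t.drop (j + 1) := by
    conv_lhs => rw [← List.take_append_drop j t]
    rw [List.drop_eq_getElem_cons hjlen, hgj']
  -- the escape character exists and is valid (from pvOkEsc)
  have hok2 : pvOkEsc ('\\' :: t.drop (j + 1)) = true := by
    rw [hdec, pv_ok_plain _ (pv_take_not_mem t '\\' j hmj)] at hok
    exact hok
  rw [pvOkEsc_cons, if_pos rfl] at hok2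
  obtain ⟨e, t', hrest⟩ : ∃ e t', t.drop (j + 1) = e :: t' := by
    cases hr : t.drop (j + 1) with
    | nil => rw [hr] at hok2; simp at hok2
    | cons e t' => exact ⟨e, t', rfl⟩
  rw [hrest] at hok2
  simp only [Bool.and_eq_true, Bool.or_eq_true, decide_eq_true_eq] at hok2
  obtain ⟨he1, hok'⟩ := hok2
  have hjlen2 : j + 1 < t.length := by
    have : (t.drop (j + 1)).length = t'.length + 1 := by rw [hrest]; simp
    rw [List.length_drop] at this; omega
  have hge : t[j + 1]? = some e := by
    rw [← List.head?_drop, hrest]; rfl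
  -- select the escape branch of A
  rw [pvLoopA, if_pos (show (k : Int) < (cs.length : Int) by exact_mod_cast hlt)]
  rw [if_neg (show ¬(nb = -1 ∧ ns = -1) by intro h; rw [hnbv] at h; omega)]
  rw [if_neg (show ¬(0 ≤ ns ∧ (nb = -1 ∨ nb > ns)) by
    rintro ⟨h0, h1⟩
    cases hnsc with
    | inl h => omega
    | inr h =>
      obtain ⟨js, hv, _, _, hjs⟩ := h
      cases h1 with
      | inl h2 => rw [h2] at hnbv; omega
      | inr h2 => rw [hnbv, hv] at h2; omega)]
  rw [if_neg (show ¬((cs.length : Int) = nb + 1) by rw [hnbv]; omega)]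
  have hpy : PySem.List.pyGet? cs (nb + 1) = some e := by
    rw [show nb + 1 = ((k + (j + 1) : Nat) : Int) by rw [hnbv]; push_cast; ring,
      PySem.List.pyGet?_natCast, ← List.getElem?_drop, ht]
    exact hge
  rw [hpy]
  have he1' : e = '/' ∨ e = '\\' := by
    rcases he1 with h | h
    · exact Or.inl h
    · exact Or.inr h
  show (if e = '/' ∨ e = '\\' then
      pvLoopA cs fuel res
        (some (cur.getD [] ++ PySem.List.slice cs (some (k : Int)) (some nb) ++ [e]))
        (nb + 2) (PySem.Chars.findFrom cs ['\\'] (nb + 2))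
        (if e = '/' then PySem.Chars.findFrom cs ['/'] (nb + 2) else ns)
      else none) = pvScanB t res cur
  rw [if_pos he1']
  have hsl : PySem.List.slice cs (some (k : Int)) (some nb) = t.take j := by
    rw [hnbv, show (k : Int) + j = ((k + j : Nat) : Int) by push_cast; ring,
      PySem.List.slice_natCast, ht, show k + j - k = j by omega]
  rw [hsl, show nb + 2 = ((k + (j + 2) : Nat) : Int) by rw [hnbv]; push_cast; ring]
  have hk' : k + (j + 2) ≤ cs.length := by omega
  have htd2 : t.drop (j + 2) = t' := by
    have h5 : (t.drop (j + 1)).drop 1 = t.drop (j + 2) := by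
      rw [List.drop_drop]
    rw [← h5, hrest]
    rfl
  have ht' : cs.drop (k + (j + 2)) = t' := by
    have h6 : cs.drop (k + (j + 2)) = (cs.drop k).drop (j + 2) := by
      rw [List.drop_drop]
    rw [h6, ht, htd2]
  have hinvb : pvInvAt t' (k + (j + 2)) '\\'
      (PySem.Chars.findFrom cs ['\\'] ((k + (j + 2) : Nat) : Int)) := by
    have := pv_findChar cs '\\' (k + (j + 2)) hk'
    rwa [ht'] at this
  have hinvs : pvInvAt t' (k + (j + 2)) '/'
      (if e = '/' then PySem.Chars.findFrom cs ['/'] ((k + (j + 2) : Nat) : Int) else ns) := by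
    by_cases he : e = '/'
    · rw [if_pos he]
      have := pv_findChar cs '/' (k + (j + 2)) hk'
      rwa [ht'] at this
    · rw [if_neg he]
      have hsh : pvInvAt (t.drop (j + 2)) (k + (j + 2)) '/' ns := by
        refine pv_inv_shift t k (j + 2) '/' ns ?_ ?_
        · cases hnsc with
          | inl h => exact Or.inl h
          | inr h =>
            obtain ⟨js, hv, hg, hm, _⟩ := h
            exact Or.inr ⟨js, hv, hg, hm⟩
        · intro i hi hc
          rcases (by omega : i < j ∨ i = j ∨ i = j + 1) with h | h | h
          · exact hd_s i h hc
          · subst h; rw [hgj] at hc; simp at hc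
          · subst h
            rw [hge] at hc
            injection hc with h2
            exact he h2
      rwa [htd2] at hsh
  rw [ih t' cs (k + (j + 2)) _ _ _ _ ht' hk'
    (by have : t'.length = t.length - (j + 2) := by rw [← htd2, List.length_drop]
        omega)
    hok' hinvb hinvs]
  conv_rhs => rw [hdec]
  rw [pv_scan_plain _ hplain, pvScanB_cons, if_pos rfl, hrest]
  simp only [if_pos he1', pv_push_getD, List.append_assoc]

-- MAIN: A's loop equals B's scan on the suffix t = cs.drop k, under the invariants
theorem pv_main : ∀ fuel (t : List Char) (cs : List Char) (k : Nat) res cur nb ns,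
    cs.drop k = t → k ≤ cs.length → t.length + 2 ≤ fuel → pvOkEsc t = true →
    pvInvAt t k '\\' nb → pvInvAt t k '/' ns →
    pvLoopA cs fuel res cur (k : Int) nb ns = pvScanB t res cur := by
  intro fuel
  induction fuel with
  | zero => intro t cs k res cur nb ns _ _ hf _ _ _; omega
  | succ fuel ih =>
    intro t cs k res cur nb ns ht hk hf hok hnb hns
    by_cases hlt : k < cs.length
    · have hlen : t.length = cs.length - k := by rw [← ht]; simp
      have htne : t ≠ [] := by
        intro h0
        rw [h0] at hlen
        simp at hlen
        omega
      cases hnb with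
      | inl hb =>
        cases hns with
        | inl hs =>
          -- no '/' and no '\' left: last chunk
          obtain ⟨hb1, hbm⟩ := hb
          obtain ⟨hs1, hsm⟩ := hs
          rw [pvLoopA, if_pos (show (k : Int) < (cs.length : Int) by exact_mod_cast hlt),
            if_pos ⟨hb1, hs1⟩, PySem.List.slice_from_natCast, ht]
          have h2 : pvLoopA cs fuel res (some (cur.getD [] ++ t)) ((cs.length : Nat) : Int) nb ns
              = pvScanB [] res (some (cur.getD [] ++ t)) := by
            rw [hb1, hs1]
            exact ih [] cs cs.length _ _ _ _ List.drop_length le_rfl (by simp; omega) rfl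
              (Or.inl ⟨rfl, by simp⟩) (Or.inl ⟨rfl, by simp⟩)
          rw [h2]
          have h3 : pvScanB t res cur = pvScanB [] res (pvPush cur t) := by
            conv_lhs => rw [← List.append_nil t]
            exact pv_scan_plain t
              (fun a ha => ⟨fun hc => hbm (hc ▸ ha), fun hc => hsm (hc ▸ ha)⟩) [] res cur
          rw [h3, pvPush, if_neg htne]
        | inr hs =>
          obtain ⟨js, hv, hg, hm⟩ := hs
          exact pv_step_slash fuel ih t cs k res cur nb ns ht hk hlt hf hok js hv hg hm
            (Or.inl hb) (Or.inl hb.1)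
      | inr hb =>
        obtain ⟨jb, hbv, hbg, hbm⟩ := hb
        cases hns with
        | inl hs =>
          exact pv_step_backslash fuel ih t cs k res cur nb ns ht hk hlt hf hok jb hbv hbg hbm
            (Or.inl hs)
        | inr hs =>
          obtain ⟨js, hsv, hsg, hsm⟩ := hs
          have hne : jb ≠ js := by
            intro h0
            rw [h0, hsg] at hbg
            simp at hbg
          rcases Nat.lt_or_ge js jb with h | h
          · exact pv_step_slash fuel ih t cs k res cur nb ns ht hk hlt hf hok js hsv hsg hsm
              (Or.inr ⟨jb, hbv, hbg, hbm⟩) (Or.inr (by rw [hbv]; omega))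
          · have hjb : jb < js := by omega
            exact pv_step_backslash fuel ih t cs k res cur nb ns ht hk hlt hf hok jb hbv hbg hbm
              (Or.inr ⟨js, hsv, hsg, hsm, hjb⟩)
    · have ht0 : t = [] := by
        rw [← ht]
        exact List.drop_eq_nil_of_le (by omega)
      rw [pvLoopA, if_neg (show ¬((k : Int) < (cs.length : Int)) by
        intro h; exact hlt (by exact_mod_cast h)), ht0, pvScanB_nil]

theorem pv_wrappers (s : String)
    (hpre : pvOkEsc s.toList = true) :
    parse_escaped_hierarchical_category_name s = parse_escaped_hierarchical_category_name_alt s := by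
  unfold parse_escaped_hierarchical_category_name parse_escaped_hierarchical_category_name_alt
  rw [show (0 : Int) = ((0 : Nat) : Int) by simp,
    pv_main (s.toList.length + 2) s.toList s.toList 0 [] none _ _ (by simp) (by simp) (by omega)
      hpre (by simpa using pv_findChar s.toList '\\' 0 (by simp))
      (by simpa using pv_findChar s.toList '/' 0 (by simp))]

-- ===== VERDICT (by name: the statement is the Claim_ definition above) =====
theorem parse_escaped_hierarchical_category_name_spec : Claim_equal_parse_escaped_hierarchical_category_name := by
  intro s _ hpre
  unfold Spec_parse_escaped_hierarchical_category_name
  exact pv_wrappers s hpre
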